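-- pv_equiv track=rewrite | github.com/espinel10/Code-Jam-2019 | QualificationRound/DatBae.py | dev_bit
-- ===== SOURCE A (Python) =====
-- def dev_bit(n,N):
--     salida=[]
--     while n>0:
--         if n%2==0:
--             salida.append(0)
--         else:
--             salida.append(1)
--         n=n//2
--     if len(salida)<N:
--         for i in range(N-len(salida)):
--             salida.append(0)
--     return salida
-- ===== SOURCE B (Python) =====
-- def dev_bit(n, N):
--     # bits of n, least significant first, via the built-in base conversion
--     bits = [int(c) for c in reversed(bin(n)[2:])] if n > 0 else []
--     bits += [0] * (N - len(bits))
--     return bits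
-- ===== Notes on version B (the rewrite author's own statement) =====
-- stated objective: idiomatic
-- what changed: B obtains the little-endian bit list from the built-in base conversion (reversed bin(n)[2:]) and pads with list arithmetic [0]*(N-len), replacing A's hand-written mod/div loop and explicit padding loop.
import Mathlib
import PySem

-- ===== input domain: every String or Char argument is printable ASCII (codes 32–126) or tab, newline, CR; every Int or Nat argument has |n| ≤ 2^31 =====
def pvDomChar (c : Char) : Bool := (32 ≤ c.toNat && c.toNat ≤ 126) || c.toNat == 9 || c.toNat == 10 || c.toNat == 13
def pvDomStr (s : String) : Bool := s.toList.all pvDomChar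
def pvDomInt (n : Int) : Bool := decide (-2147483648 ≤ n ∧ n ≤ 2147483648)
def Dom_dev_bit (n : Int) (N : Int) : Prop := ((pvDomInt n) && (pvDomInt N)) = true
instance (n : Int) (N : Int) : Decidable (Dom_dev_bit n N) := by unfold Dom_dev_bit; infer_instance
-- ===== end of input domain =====

-- B replaces A's hand-written mod/div loop and padding loop by the built-in base
-- conversion (little-endian bits of n) plus list-arithmetic padding (idiomatic; same cost).

-- ===== PORT A =====
-- the 'while n>0' loop: append n%2's bit, halve n
def devBitLoop (n : Int) : List Int :=
  if h : n > 0 then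
    (if PySem.Int.mod n 2 == 0 then (0 : Int) else 1) :: devBitLoop (PySem.Int.floordiv n 2)
  else []
termination_by n.toNat
decreasing_by
  rw [PySem.Int.floordiv_eq_ediv_of_pos (by omega : (0:Int) < 2)]
  omega

def dev_bit (n : Int) (N : Int) : List Int :=
  let salida := devBitLoop n
  if (salida.length : Int) < N then
    (PySem.List.pyRange 0 (N - (salida.length : Int)) 1).foldl (fun acc _ => acc ++ [0]) salida
  else salida

-- ===== PORT B =====
-- [int(c) for c in reversed(bin(n)[2:])] is the little-endian binary digit list of n;
-- its Lean counterpart is Mathlib's Nat.digits 2. Padding: bits + [0]*(N-len(bits)),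
-- where [0]*(negative) = [] is rendered by .toNat clamping.
def dev_bit_alt (n : Int) (N : Int) : List Int :=
  let bits : List Int := if n > 0 then (Nat.digits 2 n.toNat).map (fun d => Int.ofNat d) else []
  bits ++ List.replicate (N - (bits.length : Int)).toNat 0

-- ===== PRECONDITION & SPEC =====
def Spec_dev_bit (n : Int) (N : Int) (out : List Int) : Prop := out = dev_bit_alt n N
instance (n : Int) (N : Int) (out : List Int) : Decidable (Spec_dev_bit n N out) := by unfold Spec_dev_bit; infer_instance

-- ===== CLAIM (what is proved, stated in full; the proofs are below) =====
def Claim_equal_dev_bit : Prop := ∀ (n : Int) (N : Int), Dom_dev_bit n N → Spec_dev_bit n N (dev_bit n N)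

-- ===== LEMMAS AND PROOFS =====

-- A's bit loop produces exactly the little-endian base-2 digits of n.toNat
theorem devBitLoop_eq_digits (n : Int) :
    devBitLoop n = (Nat.digits 2 n.toNat).map (fun d => Int.ofNat d) := by
  by_cases h : n > 0
  · rw [devBitLoop, dif_pos h]
    have h2 : (0:Int) < 2 := by omega
    have hm : PySem.Int.mod n 2 = n % 2 := PySem.Int.mod_eq_emod_of_pos h2
    have hd : PySem.Int.floordiv n 2 = n / 2 := PySem.Int.floordiv_eq_ediv_of_pos h2
    have hpos : 0 < n.toNat := by omega
    rw [Nat.digits_def' (by norm_num : 1 < 2) hpos, List.map_cons]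
    have ih := devBitLoop_eq_digits (PySem.Int.floordiv n 2)
    have ht : (PySem.Int.floordiv n 2).toNat = n.toNat / 2 := by rw [hd]; omega
    rw [ih, ht]
    congr 1
    rcases Int.emod_two_eq n with he | he
    · have h0 : n.toNat % 2 = 0 := by omega
      rw [hm, he, h0]; norm_num
    · have h1 : n.toNat % 2 = 1 := by omega
      rw [hm, he, h1]; norm_num
  · rw [devBitLoop, dif_neg h]
    have : n.toNat = 0 := by omega
    simp [this]
termination_by n.toNat
decreasing_by
  rw [PySem.Int.floordiv_eq_ediv_of_pos (by omega : (0:Int) < 2)]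
  omega

-- the padding loop appends one 0 per iteration
theorem foldl_append_zero {α : Type} (l : List α) (s : List Int) :
    l.foldl (fun acc _ => acc ++ [0]) s = s ++ List.replicate l.length 0 := by
  induction l generalizing s with
  | nil => simp
  | cons x xs ih =>
    rw [List.foldl_cons, ih, List.append_assoc, List.length_cons]
    rfl

-- ===== VERDICT (by name: the statement is the Claim_ definition above) =====
theorem dev_bit_spec : Claim_equal_dev_bit := by
  intro n N _
  unfold Spec_dev_bit dev_bit dev_bit_alt
  have hbits : devBitLoop n
      = (if n > 0 then (Nat.digits 2 n.toNat).map (fun d => Int.ofNat d) else []) := by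
    split_ifs with h
    · exact devBitLoop_eq_digits n
    · rw [devBitLoop, dif_neg h]
  simp only [← hbits]
  set s := devBitLoop n with hs
  split_ifs with h
  · rw [foldl_append_zero]
    congr 1
    rw [PySem.List.length_pyRange_one]
    congr 1
    omega
  · have : (N - (s.length : Int)).toNat = 0 := by omega
    simp [this]
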